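-- pv_equiv track=rewrite | github.com/taniacahya89/personal-finance-assistant | finance_calculator.py | categorize_expense_type
-- ===== SOURCE A (Python) =====
-- EXPENSE_CATEGORIES = {
--     "Kebutuhan (Needs)": [
--         "Makanan & Minuman",
--         "Transportasi",
--         "Tagihan (Listrik, Air, Internet)",
--         "Sewa/Cicilan Rumah",
--         "Kesehatan",
--         "Pendidikan"
--     ],
--     "Keinginan (Wants)": [
--         "Hiburan",
--         "Belanja (Fashion, Gadget)",
--         "Makan di Luar (Restaurant)",
--         "Traveling",
--         "Hobi"
--     ],
--     "Lainnya": [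
--         "Lainnya"
--     ]
-- }
--
-- def categorize_expense_type(category: str) -> str:
--     """Determine if expense is Needs, Wants, or Other"""
--     for expense_type, categories in EXPENSE_CATEGORIES.items():
--         if category in categories:
--             if "Kebutuhan" in expense_type:
--                 return "Needs"
--             elif "Keinginan" in expense_type:
--                 return "Wants"
--             else:
--                 return "Other"
--     return "Other"
-- ===== SOURCE B (Python) =====
-- REVERSE_MAP = {
--     "Makanan & Minuman": "Needs",
--     "Transportasi": "Needs",
--     "Tagihan (Listrik, Air, Internet)": "Needs",
--     "Sewa/Cicilan Rumah": "Needs",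
--     "Kesehatan": "Needs",
--     "Pendidikan": "Needs",
--     "Hiburan": "Wants",
--     "Belanja (Fashion, Gadget)": "Wants",
--     "Makan di Luar (Restaurant)": "Wants",
--     "Traveling": "Wants",
--     "Hobi": "Wants",
--     "Lainnya": "Other",
-- }
--
-- def categorize_expense_type(category: str) -> str:
--     """Determine if expense is Needs, Wants, or Other"""
--     return REVERSE_MAP.get(category, "Other")
-- ===== Notes on version B (the rewrite author's own statement) =====
-- stated objective: idiomatic
-- what changed: Replaced the per-call loop over the nested category dict with its list-membership test and substring branches by a flat reverse-lookup dict built once at module load; the function body is a single dict .get with the original fall-through default.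
import Mathlib
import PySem

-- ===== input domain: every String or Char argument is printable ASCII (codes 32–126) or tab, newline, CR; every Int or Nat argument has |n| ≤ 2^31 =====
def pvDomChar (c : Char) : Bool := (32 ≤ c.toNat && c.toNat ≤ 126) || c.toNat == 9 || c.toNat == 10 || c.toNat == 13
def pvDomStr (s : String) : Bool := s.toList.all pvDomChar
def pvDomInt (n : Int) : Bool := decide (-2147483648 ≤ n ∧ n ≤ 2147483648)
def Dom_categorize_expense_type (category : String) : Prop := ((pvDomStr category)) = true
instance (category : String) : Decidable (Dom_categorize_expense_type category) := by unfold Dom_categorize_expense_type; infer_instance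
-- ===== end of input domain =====

-- B replaces A's per-call loop over the nested category dict (membership test + substring
-- branches) by one flat reverse-lookup dict with a single .get(category, "Other") — idiomatic.

-- ===== PORT A =====
def EXPENSE_CATEGORIES : List (String × List String) :=
  [("Kebutuhan (Needs)",
      ["Makanan & Minuman", "Transportasi", "Tagihan (Listrik, Air, Internet)",
       "Sewa/Cicilan Rumah", "Kesehatan", "Pendidikan"]),
   ("Keinginan (Wants)",
      ["Hiburan", "Belanja (Fashion, Gadget)", "Makan di Luar (Restaurant)",
       "Traveling", "Hobi"]),
   ("Lainnya", ["Lainnya"])]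

-- the for-loop over EXPENSE_CATEGORIES.items() with its early returns
def categorizeLoop : List (String × List String) → String → String
  | [], _ => "Other"
  | (expense_type, categories) :: rest, category =>
      if categories.contains category then
        if PySem.Str.isIn "Kebutuhan" expense_type then "Needs"
        else if PySem.Str.isIn "Keinginan" expense_type then "Wants"
        else "Other"
      else categorizeLoop rest category

def categorize_expense_type (category : String) : String :=
  categorizeLoop EXPENSE_CATEGORIES category

-- ===== PORT B =====
def REVERSE_MAP : PySem.Dict String String :=
  PySem.Dict.ofList
    [("Makanan & Minuman", "Needs"), ("Transportasi", "Needs"),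
     ("Tagihan (Listrik, Air, Internet)", "Needs"), ("Sewa/Cicilan Rumah", "Needs"),
     ("Kesehatan", "Needs"), ("Pendidikan", "Needs"),
     ("Hiburan", "Wants"), ("Belanja (Fashion, Gadget)", "Wants"),
     ("Makan di Luar (Restaurant)", "Wants"), ("Traveling", "Wants"),
     ("Hobi", "Wants"), ("Lainnya", "Other")]

def categorize_expense_type_alt (category : String) : String :=
  REVERSE_MAP.getD category "Other"

-- ===== PRECONDITION & SPEC =====
def Spec_categorize_expense_type (category : String) (out : String) : Prop := out = categorize_expense_type_alt category
instance (category : String) (out : String) : Decidable (Spec_categorize_expense_type category out) := by unfold Spec_categorize_expense_type; infer_instance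

-- ===== CLAIM (what is proved, stated in full; the proofs are below) =====
def Claim_equal_categorize_expense_type : Prop := ∀ (category : String), Dom_categorize_expense_type category → Spec_categorize_expense_type category (categorize_expense_type category)

-- ===== LEMMAS AND PROOFS =====

-- ===== VERDICT (by name: the statement is the Claim_ definition above) =====
theorem categorize_expense_type_spec : Claim_equal_categorize_expense_type := by
  intro category _
  unfold Spec_categorize_expense_type categorize_expense_type categorize_expense_type_alt
  by_cases h1 : category = "Makanan & Minuman"; · subst h1; decide
  by_cases h2 : category = "Transportasi"; · subst h2; decide
  by_cases h3 : category = "Tagihan (Listrik, Air, Internet)"; · subst h3; decide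
  by_cases h4 : category = "Sewa/Cicilan Rumah"; · subst h4; decide
  by_cases h5 : category = "Kesehatan"; · subst h5; decide
  by_cases h6 : category = "Pendidikan"; · subst h6; decide
  by_cases h7 : category = "Hiburan"; · subst h7; decide
  by_cases h8 : category = "Belanja (Fashion, Gadget)"; · subst h8; decide
  by_cases h9 : category = "Makan di Luar (Restaurant)"; · subst h9; decide
  by_cases h10 : category = "Traveling"; · subst h10; decide
  by_cases h11 : category = "Hobi"; · subst h11; decide
  by_cases h12 : category = "Lainnya"; · subst h12; decide
  have hmk : REVERSE_MAP = PySem.Dict.mk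
      [("Makanan & Minuman", "Needs"), ("Transportasi", "Needs"),
       ("Tagihan (Listrik, Air, Internet)", "Needs"), ("Sewa/Cicilan Rumah", "Needs"),
       ("Kesehatan", "Needs"), ("Pendidikan", "Needs"),
       ("Hiburan", "Wants"), ("Belanja (Fashion, Gadget)", "Wants"),
       ("Makan di Luar (Restaurant)", "Wants"), ("Traveling", "Wants"),
       ("Hobi", "Wants"), ("Lainnya", "Other")] := by decide
  rw [hmk]
  simp [categorizeLoop, EXPENSE_CATEGORIES, PySem.Dict.getD, PySem.Dict.get?,
        List.contains_eq_mem, h1, h2, h3, h4, h5, h6, h7, h8, h9, h10, h11, h12,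
        Ne.symm h1, Ne.symm h2, Ne.symm h3, Ne.symm h4, Ne.symm h5, Ne.symm h6,
        Ne.symm h7, Ne.symm h8, Ne.symm h9, Ne.symm h10, Ne.symm h11, Ne.symm h12]
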